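-- pv_equiv track=rewrite | github.com/DMurray-Chadfield/learning_exercises | mod_comp_arch_org/babbage.py | perform_babbage_addition
-- ===== SOURCE A (Python) =====
-- def perform_babbage_addition(arg_add, arg_acc, arg_carry=0):
--     return_carry = 0
--     while arg_add != 0 or arg_carry != 0:
--         if arg_carry == 0:
--             arg_add -= 1
--         else:
--             arg_carry -= 1
--
--         arg_acc += 1
--         arg_acc %= 10
--         if arg_acc == 0:
--             return_carry += 1
--
--     return arg_add, arg_acc, return_carry
-- ===== SOURCE B (Python) =====
-- def perform_babbage_addition(arg_add, arg_acc, arg_carry=0):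
--     # closed form: n increments of a mod-10 accumulator produce
--     # (acc%10 + n) % 10 with (acc%10 + n) // 10 rollovers past 0
--     if arg_add == 0 and arg_carry == 0:
--         return arg_add, arg_acc, 0
--     total = arg_acc % 10 + arg_add + arg_carry
--     return 0, total % 10, total // 10
-- ===== Notes on version B (the rewrite author's own statement) =====
-- stated objective: faster
-- what changed: Replaced the unary decrement loop (arg_add+arg_carry iterations of +1 mod 10 with rollover counting) by a closed-form computation: total = arg_acc%10 + arg_add + arg_carry, result (0, total%10, total//10), with the zero-iteration case returning the accumulator untouched.
import Mathlib
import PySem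

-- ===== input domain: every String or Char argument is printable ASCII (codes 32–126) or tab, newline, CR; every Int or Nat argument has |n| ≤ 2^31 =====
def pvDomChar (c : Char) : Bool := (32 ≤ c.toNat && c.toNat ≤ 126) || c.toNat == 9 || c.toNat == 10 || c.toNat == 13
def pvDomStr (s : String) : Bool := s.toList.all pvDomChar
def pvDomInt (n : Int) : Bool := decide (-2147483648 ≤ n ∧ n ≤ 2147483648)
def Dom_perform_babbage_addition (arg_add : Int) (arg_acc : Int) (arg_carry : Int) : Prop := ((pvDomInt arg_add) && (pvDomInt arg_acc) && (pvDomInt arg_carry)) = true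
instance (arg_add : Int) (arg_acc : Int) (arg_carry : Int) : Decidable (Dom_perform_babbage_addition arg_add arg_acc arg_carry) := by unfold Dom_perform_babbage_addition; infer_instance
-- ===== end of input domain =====

-- B replaces A's unary +1-mod-10 loop by the O(1) closed form divmod(acc%10 + add + carry, 10).

-- ===== PORT A =====
-- A's while loop, fuel = arg_add + arg_carry (the exact iteration count whenever the
-- Python loop terminates, i.e. under Pre_; fuel-exhaustion return only covers inputs
-- outside Pre_ where Python diverges).
def pvBabLoop (fuel : Nat) (add carry acc rc : Int) : List Int :=
  match fuel with
  | 0 => [add, acc, rc]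
  | f + 1 =>
    if add ≠ 0 ∨ carry ≠ 0 then
      let p := if carry = 0 then (add - 1, carry) else (add, carry - 1)
      let acc' := PySem.Int.mod (acc + 1) 10
      let rc' := if acc' = 0 then rc + 1 else rc
      pvBabLoop f p.1 p.2 acc' rc'
    else [add, acc, rc]

def perform_babbage_addition (arg_add : Int) (arg_acc : Int) (arg_carry : Int) : List Int :=
  pvBabLoop (arg_add + arg_carry).toNat arg_add arg_carry arg_acc 0

-- ===== PORT B =====
def perform_babbage_addition_alt (arg_add : Int) (arg_acc : Int) (arg_carry : Int) : List Int :=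
  if arg_add = 0 ∧ arg_carry = 0 then [arg_add, arg_acc, 0]
  else
    let total := PySem.Int.mod arg_acc 10 + arg_add + arg_carry
    [0, PySem.Int.mod total 10, PySem.Int.floordiv total 10]

-- ===== PRECONDITION & SPEC =====
-- A's while loop never terminates when arg_add or arg_carry is negative (the decremented
-- counter moves away from 0 forever): exactly those inputs are excluded.
def Pre_perform_babbage_addition (arg_add : Int) (arg_acc : Int) (arg_carry : Int) : Prop :=
  0 ≤ arg_add ∧ 0 ≤ arg_carry
instance (arg_add : Int) (arg_acc : Int) (arg_carry : Int) : Decidable (Pre_perform_babbage_addition arg_add arg_acc arg_carry) := by unfold Pre_perform_babbage_addition; infer_instance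

def pvWitness_perform_babbage_addition : Int × Int × Int := (3, 27, 2)

def Spec_perform_babbage_addition (arg_add : Int) (arg_acc : Int) (arg_carry : Int) (out : List Int) : Prop := out = perform_babbage_addition_alt arg_add arg_acc arg_carry
instance (arg_add : Int) (arg_acc : Int) (arg_carry : Int) (out : List Int) : Decidable (Spec_perform_babbage_addition arg_add arg_acc arg_carry out) := by unfold Spec_perform_babbage_addition; infer_instance

-- ===== CLAIM (what is proved, stated in full; the proofs are below) =====
def Claim_equal_perform_babbage_addition : Prop := ∀ (arg_add : Int) (arg_acc : Int) (arg_carry : Int), Dom_perform_babbage_addition arg_add arg_acc arg_carry → Pre_perform_babbage_addition arg_add arg_acc arg_carry → Spec_perform_babbage_addition arg_add arg_acc arg_carry (perform_babbage_addition arg_add arg_acc arg_carry)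

-- ===== LEMMAS AND PROOFS =====

theorem pvMod10 (a : Int) : PySem.Int.mod a 10 = a % 10 :=
  PySem.Int.mod_eq_emod_of_pos (by norm_num)

theorem pvDiv10 (a : Int) : PySem.Int.floordiv a 10 = a / 10 :=
  PySem.Int.floordiv_eq_ediv_of_pos (by norm_num)

-- closed form of A's loop when fuel equals the remaining iteration count
theorem pvBabLoop_closed (fuel : Nat) : ∀ (add carry acc rc : Int),
    0 ≤ add → 0 ≤ carry → fuel = (add + carry).toNat →
    pvBabLoop fuel add carry acc rc =
      if add = 0 ∧ carry = 0 then [add, acc, rc]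
      else [0, (acc % 10 + add + carry) % 10, rc + (acc % 10 + add + carry) / 10] := by
  induction fuel with
  | zero =>
    intro add carry acc rc ha hc hf
    have : add = 0 ∧ carry = 0 := by omega
    simp [pvBabLoop, this]
  | succ f ih =>
    intro add carry acc rc ha hc hf
    by_cases h0 : add = 0 ∧ carry = 0
    · have : ¬ (add ≠ 0 ∨ carry ≠ 0) := by omega
      simp [pvBabLoop, h0]
    · have hcond : add ≠ 0 ∨ carry ≠ 0 := by omega
      simp only [pvBabLoop, if_pos hcond]
      by_cases hcz : carry = 0
      · simp only [if_pos hcz]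
        rw [ih (add - 1) carry (PySem.Int.mod (acc + 1) 10) _ (by omega) hc (by omega)]
        simp only [pvMod10, if_neg h0]
        split_ifs <;> simp_all <;> omega
      · simp only [if_neg hcz]
        rw [ih add (carry - 1) (PySem.Int.mod (acc + 1) 10) _ ha (by omega) (by omega)]
        simp only [pvMod10, if_neg h0]
        split_ifs <;> simp_all <;> omega

-- ===== VERDICT (by name: the statement is the Claim_ definition above) =====
theorem perform_babbage_addition_spec : Claim_equal_perform_babbage_addition := by
  intro add acc carry _ hpre
  unfold Spec_perform_babbage_addition perform_babbage_addition perform_babbage_addition_alt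
  rw [pvBabLoop_closed _ add carry acc 0 hpre.1 hpre.2 rfl]
  simp only [pvMod10, pvDiv10, zero_add]
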